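-- pv_equiv track=rewrite | github.com/zer0kola/javascript-algorithm-solutions | 프로그래머스/lv0/120842. 2차원으로 만들기/2차원으로 만들기.py | solution
-- ===== SOURCE A (Python) =====
-- def solution(num_list, n):
--     answer = [[]]
--     num = 0
--     # answer[0].append(num_list[0])
--     # answer[0].append(num_list[1])
--     # answer[1].append(num_list[2])
--     # answer[1].append(num_list[3])
--     for i in range(len(num_list)):
--         answer[num].append(num_list[i])
--         if ((i+1) % n == 0):
--             num += 1
--             answer.append([])
--     answer.pop()
--     return answer
-- ===== SOURCE B (Python) =====
-- def solution(num_list, n):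
--     L = len(num_list)
--     return [num_list[i:i + n] for i in range(0, L - L % n, n)]
-- ===== Notes on version B (the rewrite author's own statement) =====
-- stated objective: simpler
-- what changed: B builds each row in one step with a C-level slice num_list[i:i+n] over stride-n start indices (stopping before the incomplete tail), instead of A's per-element appends into a mutable row with a running counter and a final pop.
-- outside the precondition, e.g. on solution([1, 2, 3, 4, 5], -2): A returns [[1, 2], [3, 4]], B returns []; on solution([], 0): A returns [], B raises ZeroDivisionError
import Mathlib
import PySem

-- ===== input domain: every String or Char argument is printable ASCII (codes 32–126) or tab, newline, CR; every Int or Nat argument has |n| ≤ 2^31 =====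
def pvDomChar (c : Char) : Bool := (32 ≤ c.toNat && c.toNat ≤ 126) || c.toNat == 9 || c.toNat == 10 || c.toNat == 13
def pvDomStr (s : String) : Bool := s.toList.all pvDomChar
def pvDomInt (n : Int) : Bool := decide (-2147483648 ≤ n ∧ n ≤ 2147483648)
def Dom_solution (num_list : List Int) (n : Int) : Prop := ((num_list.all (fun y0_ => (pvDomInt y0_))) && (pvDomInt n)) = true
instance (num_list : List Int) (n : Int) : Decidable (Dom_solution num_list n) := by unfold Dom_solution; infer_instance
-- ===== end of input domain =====

-- B replaces A's per-element appends + counter + final pop by one slice num_list[i:i+n] per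
-- stride-n start index, stopping before the incomplete tail (objective: simpler).

-- ===== PORT A =====
-- answer[num].append(x) is modelled by List.modify at index num (num always points at the last row).
def solution (num_list : List Int) (n : Int) : List (List Int) :=
  let st :=
    (PySem.List.pyRange 0 (num_list.length : Int) 1).foldl
      (fun (st : List (List Int) × Nat) i =>
        let answer := st.1.modify st.2 (fun row => row ++ [PySem.List.pyGetD num_list i 0])
        if PySem.Int.mod (i + 1) n = 0 then (answer ++ [[]], st.2 + 1) else (answer, st.2))
      ([[]], 0)
  st.1.dropLast

-- ===== PORT B =====
def solution_alt (num_list : List Int) (n : Int) : List (List Int) :=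
  let L : Int := (num_list.length : Int)
  (PySem.List.pyRange 0 (L - PySem.Int.mod L n) n).map
    (fun i => PySem.List.slice num_list (some i) (some (i + n)))

-- ===== PRECONDITION & SPEC =====
-- Pre_ restricts to the natural domain of chunk sizes: n ≥ 1. It excludes n = 0, where A raises
-- ZeroDivisionError on non-empty input (and returns [] on empty input while B raises), and
-- negative n, where A's chunking by |n| is an accident of Python's divisor-signed modulo that B
-- does not reproduce.
def Pre_solution (_num_list : List Int) (n : Int) : Prop := 1 ≤ n
instance (num_list : List Int) (n : Int) : Decidable (Pre_solution num_list n) := by unfold Pre_solution; infer_instance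
def pvWitness_solution : List Int × Int := ([1, 2, 3, 4, 5], 2)
def Spec_solution (num_list : List Int) (n : Int) (out : List (List Int)) : Prop := out = solution_alt num_list n
instance (num_list : List Int) (n : Int) (out : List (List Int)) : Decidable (Spec_solution num_list n out) := by unfold Spec_solution; infer_instance

-- ===== CLAIM (what is proved, stated in full; the proofs are below) =====
def Claim_equal_solution : Prop := ∀ (num_list : List Int) (n : Int), Dom_solution num_list n → Pre_solution num_list n → Spec_solution num_list n (solution num_list n)

-- ===== LEMMAS AND PROOFS =====

-- The rows A's loop produces: `cur` is the partially filled last row, `k` its remaining capacity.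
def fillChunks (N : Nat) : List Int → Nat → List Int → List (List Int)
  | cur, _, [] => [cur]
  | cur, k, x :: xs => if k ≤ 1 then (cur ++ [x]) :: fillChunks N [] N xs
                       else fillChunks N (cur ++ [x]) (k - 1) xs

theorem fillChunks_ne_nil (N : Nat) (cur : List Int) (k : Nat) (l : List Int) :
    fillChunks N cur k l ≠ [] := by
  induction l generalizing cur k with
  | nil => simp [fillChunks]
  | cons x xs ih =>
    simp only [fillChunks]
    split_ifs
    · simp
    · exact ih _ _

theorem modify_append_last (acc : List (List Int)) (c : List Int) (f : List Int → List Int) :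
    (acc ++ [c]).modify acc.length f = acc ++ [f c] := by
  induction acc with
  | nil => simp [List.modify]
  | cons a t ih => simpa [List.modify] using ih

theorem loopA (n : Int) (hn : 1 ≤ n) (l : List Int) :
    ∀ (s : Int) (acc : List (List Int)) (cur : List Int),
      0 ≤ s → PySem.Int.mod s n = (cur.length : Int) →
      ((PySem.List.enumerate l s).foldl
        (fun (st : List (List Int) × Nat) p =>
          let answer := st.1.modify st.2 (fun row => row ++ [p.2])
          if PySem.Int.mod (p.1 + 1) n = 0 then (answer ++ [[]], st.2 + 1) else (answer, st.2))
        (acc ++ [cur], acc.length)).1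
      = acc ++ fillChunks n.toNat cur (n.toNat - cur.length) l := by
  induction l with
  | nil => intro s acc cur _ _; simp [PySem.List.enumerate_nil, fillChunks]
  | cons x xs ih =>
    intro s acc cur hs hcur
    have hn0 : (0:Int) < n := by omega
    have hmod := PySem.Int.mod_lt s hn0
    have hcl : (cur.length : Int) < n := hcur ▸ hmod
    rw [PySem.List.enumerate_cons]
    simp only [List.foldl_cons, modify_append_last]
    have hsn : s % n = (cur.length : Int) := by
      rw [← PySem.Int.mod_eq_emod_of_pos hn0]; exact hcur
    have hstep : PySem.Int.mod (s + 1) n = ((cur.length : Int) + 1) % n := by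
      rw [PySem.Int.mod_eq_emod_of_pos hn0]
      conv_lhs => rw [show s + 1 = s % n + 1 + n * (s / n) by rw [Int.emod_def]; ring]
      rw [Int.add_mul_emod_self_left, hsn]
    by_cases hfull : (cur.length : Int) + 1 = n
    · have h0 : PySem.Int.mod (s + 1) n = 0 := by
        rw [hstep, hfull, Int.emod_self]
      rw [if_pos h0]
      have hrw : (acc ++ [cur ++ [x]] ++ [[]], acc.length + 1)
          = ((acc ++ [cur ++ [x]]) ++ [([] : List Int)], (acc ++ [cur ++ [x]]).length) := by
        simp
      rw [hrw, ih (s+1) (acc ++ [cur ++ [x]]) [] (by omega) (by simpa using h0)]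
      have hk1 : n.toNat - cur.length ≤ 1 := by omega
      simp [fillChunks, hk1]
    · have hne : ¬ PySem.Int.mod (s + 1) n = 0 := by
        rw [hstep, Int.emod_eq_of_lt (by omega) (by omega)]
        omega
      rw [if_neg hne]
      rw [ih (s+1) acc (cur ++ [x]) (by omega)
        (by rw [hstep, Int.emod_eq_of_lt (by omega) (by omega)]; simp)]
      have hk1 : ¬ (n.toNat - cur.length ≤ 1) := by omega
      have hsub : n.toNat - cur.length - 1 = n.toNat - (cur ++ [x]).length := by
        simp; omega
      simp only [fillChunks, if_neg hk1, hsub]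

-- A's result is the filled rows with the last (empty or partial) row dropped.
theorem solution_eq_fill (num_list : List Int) (n : Int) (hn : 1 ≤ n) :
    solution num_list n = (fillChunks n.toNat [] n.toNat num_list).dropLast := by
  have hn0 : (0:Int) < n := by omega
  unfold solution
  have henum : PySem.List.enumerate num_list 0
      = (PySem.List.pyRange 0 (num_list.length : Int) 1).map
          (fun j => (j, PySem.List.pyGetD num_list j 0)) := by
    simpa [PySem.List.len_eq] using PySem.List.enumerate_eq_map_pyRange num_list 0
  have h := loopA n hn num_list 0 [] [] (le_refl 0)
    (by rw [PySem.Int.mod_eq_emod_of_pos hn0]; simp)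
  rw [henum, List.foldl_map] at h
  simp only [List.nil_append, List.length_nil, Nat.sub_zero] at h
  simp only [h]

-- block characterization of fillChunks
theorem fillChunks_blocks (N : Nat) (l : List Int) :
    ∀ (cur : List Int) (k : Nat), 0 < k → k ≤ N →
      fillChunks N cur k l =
        if l.length < k then [cur ++ l]
        else (cur ++ l.take k) :: fillChunks N [] N (l.drop k) := by
  induction l with
  | nil => intro cur k hk _; simp [fillChunks, hk]
  | cons x xs ih =>
    intro cur k hk hkN
    by_cases h1 : k ≤ 1
    · have hk1 : k = 1 := by omega
      subst hk1
      simp [fillChunks]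
    · rw [show fillChunks N cur k (x :: xs) = fillChunks N (cur ++ [x]) (k-1) xs from by
        simp [fillChunks, h1]]
      rw [ih (cur ++ [x]) (k-1) (by omega) (by omega)]
      obtain ⟨m, rfl⟩ : ∃ m, k = m + 1 := ⟨k - 1, by omega⟩
      have hlen : xs.length < m ↔ (x :: xs).length < m + 1 := by simp
      by_cases h2 : xs.length < m
      · rw [if_pos (by simpa using h2), if_pos (hlen.mp h2)]
        simp
      · rw [if_neg (by simpa using h2), if_neg (fun hc => h2 (hlen.mpr hc))]
        simp

theorem pyRange_pos_cons (a b s : Int) (hs : 0 < s) (hab : a < b) :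
    PySem.List.pyRange a b s = a :: PySem.List.pyRange (a + s) b s := by
  rw [PySem.List.pyRange_of_pos _ _ hs, PySem.List.pyRange_of_pos _ _ hs, if_pos hab]
  by_cases h2 : a + s < b
  · rw [if_pos h2]
    have hc : ((b - a + s - 1) / s).toNat = ((b - (a+s) + s - 1) / s).toNat + 1 := by
      have he : b - a + s - 1 = (b - (a+s) + s - 1) + 1 * s := by ring
      rw [he, Int.add_mul_ediv_right _ _ (by omega)]
      have h0 : 0 ≤ (b - (a+s) + s - 1) / s := Int.ediv_nonneg (by omega) (by omega)
      omega
    rw [hc, List.range_succ_eq_map]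
    simp [List.map_map, Function.comp]
    intro k _
    ring
  · rw [if_neg h2]
    have h1 : (b - a + s - 1) / s = 1 := by
      have hf := (PySem.Int.floordiv_eq_iff_of_pos (a := b - a + s - 1) (b := s) (q := 1) hs).mpr
        ⟨by omega, by omega⟩
      rwa [PySem.Int.floordiv_eq_ediv_of_pos hs] at hf
    rw [h1]
    simp


theorem pyRange_pos_shift (a b c s : Int) (hs : 0 < s) :
    PySem.List.pyRange (a + c) (b + c) s = (PySem.List.pyRange a b s).map (· + c) := by
  rw [PySem.List.pyRange_of_pos _ _ hs, PySem.List.pyRange_of_pos _ _ hs]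
  by_cases h : a < b
  · rw [if_pos (show a + c < b + c by omega), if_pos h]
    have he : b + c - (a + c) = b - a := by ring
    rw [he, List.map_map]
    apply List.map_congr_left
    intro k _
    simp [Function.comp]
    ring
  · rw [if_neg (show ¬ (a + c < b + c) by omega), if_neg h]
    simp


theorem alt_small (num_list : List Int) (n : Int) (hn : 1 ≤ n)
    (h : num_list.length < n.toNat) : solution_alt num_list n = [] := by
  unfold solution_alt
  have hN : n = (n.toNat : Int) := (Int.toNat_of_nonneg (by omega)).symm
  have hmod : PySem.Int.mod (num_list.length : Int) n = (num_list.length : Int) := by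
    rw [hN, PySem.Int.mod_natCast, Nat.mod_eq_of_lt h]
  simp only [hmod, sub_self]
  rw [PySem.List.pyRange_of_pos _ _ (by omega : (0:Int) < n)]
  simp


theorem alt_step (num_list : List Int) (n : Int) (hn : 1 ≤ n)
    (h : n.toNat ≤ num_list.length) :
    solution_alt num_list n =
      num_list.take n.toNat :: solution_alt (num_list.drop n.toNat) n := by
  unfold solution_alt
  have hn0 : (0:Int) < n := by omega
  have hN : n = (n.toNat : Int) := (Int.toNat_of_nonneg (by omega)).symm
  have hNpos : 0 < n.toNat := by omega
  have hLmod : num_list.length % n.toNat = (num_list.length - n.toNat) % n.toNat := by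
    conv_lhs => rw [show num_list.length = (num_list.length - n.toNat) + n.toNat by omega]
    rw [Nat.add_mod_right]
  have hmodle : (num_list.length - n.toNat) % n.toNat ≤ num_list.length - n.toNat :=
    Nat.mod_le _ _
  have hmodN : (num_list.length - n.toNat) % n.toNat < n.toNat := Nat.mod_lt _ hNpos
  have hmod : PySem.Int.mod (num_list.length : Int) n
      = ((num_list.length % n.toNat : Nat) : Int) := by
    rw [hN, PySem.Int.mod_natCast]
    simp
  have hstop : (num_list.length : Int) - PySem.Int.mod (num_list.length : Int) n
      = ((n.toNat + (num_list.length - n.toNat - (num_list.length - n.toNat) % n.toNat) : Nat) : Int) := by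
    rw [hmod]
    have h1 : num_list.length % n.toNat ≤ num_list.length := Nat.mod_le _ _
    push_cast
    omega
  simp only [hstop]
  rw [pyRange_pos_cons _ _ _ hn0 (by push_cast; omega)]
  rw [List.map_cons]
  congr 1
  · rw [show (0:Int) + n = n from by ring]
    rw [PySem.List.slice_zero_start, PySem.List.slice_to _ (by omega)]
  · have hshift : PySem.List.pyRange (0 + n)
        ((n.toNat + (num_list.length - n.toNat - (num_list.length - n.toNat) % n.toNat) : Nat) : Int) n
        = (PySem.List.pyRange 0
            ((num_list.length - n.toNat - (num_list.length - n.toNat) % n.toNat : Nat) : Int) n).map (· + n) := by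
      have he : ((n.toNat + (num_list.length - n.toNat - (num_list.length - n.toNat) % n.toNat) : Nat) : Int)
          = ((num_list.length - n.toNat - (num_list.length - n.toNat) % n.toNat : Nat) : Int) + n := by
        rw [hN]; simp; ring
      rw [he]
      exact pyRange_pos_shift 0 _ n n hn0
    rw [hshift, List.map_map]
    have hdroplen : ((num_list.drop n.toNat).length : Int) = ((num_list.length - n.toNat : Nat) : Int) := by
      simp
    have hdm : PySem.Int.mod ((num_list.length - n.toNat : Nat) : Int) n
        = (((num_list.length - n.toNat) % n.toNat : Nat) : Int) := by
      rw [hN, PySem.Int.mod_natCast]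
      simp
    simp only [hdroplen, hdm]
    have hstop2 : ((num_list.length - n.toNat : Nat) : Int)
        - (((num_list.length - n.toNat) % n.toNat : Nat) : Int)
        = ((num_list.length - n.toNat - (num_list.length - n.toNat) % n.toNat : Nat) : Int) := by
      push_cast
      omega
    rw [hstop2]
    apply List.map_congr_left
    intro i hi
    have hmem := (PySem.List.mem_pyRange_iff_of_pos hn0 i).mp hi
    obtain ⟨j, rfl⟩ : ∃ j : Nat, i = (j : Int) := ⟨i.toNat, by omega⟩
    simp only [Function.comp]
    rw [hN]
    simp only [Int.toNat_natCast]
    rw [PySem.List.slice_natCast_add (List.drop n.toNat num_list) j n.toNat]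
    have e : ((j:Int) + (n.toNat:Int)) = ((j + n.toNat : Nat) : Int) := by push_cast; ring
    rw [e, PySem.List.slice_natCast_add num_list (j + n.toNat) n.toNat]
    rw [List.drop_drop, Nat.add_comm j n.toNat]

theorem fill_eq_alt (n : Int) (hn : 1 ≤ n) :
    ∀ (m : Nat) (l : List Int), l.length ≤ m →
      (fillChunks n.toNat [] n.toNat l).dropLast = solution_alt l n := by
  intro m
  induction m with
  | zero =>
    intro l hl
    have : l = [] := by cases l <;> simp_all
    subst this
    rw [alt_small [] n hn (by simp; omega)]
    simp [fillChunks]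
  | succ m ih =>
    intro l hl
    by_cases h : l.length < n.toNat
    · rw [alt_small l n hn h]
      rw [fillChunks_blocks n.toNat l [] n.toNat (by omega) (le_refl _), if_pos h]
      simp
    · rw [alt_step l n hn (by omega)]
      rw [fillChunks_blocks n.toNat l [] n.toNat (by omega) (le_refl _), if_neg h]
      rw [List.dropLast_cons_of_ne_nil (fillChunks_ne_nil _ _ _ _)]
      rw [ih (l.drop n.toNat) (by simp; omega)]
      simp

-- ===== VERDICT (by name: the statement is the Claim_ definition above) =====
theorem solution_spec : Claim_equal_solution := by
  intro num_list n _ hpre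
  unfold Spec_solution
  rw [solution_eq_fill num_list n hpre,
    fill_eq_alt n hpre num_list.length num_list (le_refl _)]
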